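-- pv_equiv track=rewrite | github.com/xuedong/leet-code | Problems/Algorithms/1497. Check If Array Pairs Are Divisible by k/array_pairs_divisible_by_k.py | canArrange
-- ===== SOURCE A (Python) =====
-- from typing import List
--
-- def canArrange(arr: List[int], k: int) -> bool:
--     count = {}
--
--     for i in arr:
--         count[(i % k + k) % k] = count.get((i % k + k) % k, 0) + 1
--
--     for i in arr:
--         curr = (i % k + k) % k
--         if curr == 0:
--             if count[curr] % 2 == 1:
--                 return False
--         elif count[curr] != count.get(k - curr, 0):
--             return False
--     return True
-- ===== SOURCE B (Python) =====
-- def canArrange(arr, k):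
--     m = abs(k)
--     rem = sorted(x % m for x in arr)
--     i = 0
--     while i < len(rem) and rem[i] == 0:
--         i += 1
--     if i % 2 == 1:
--         return False
--     j = len(rem) - 1
--     while i < j:
--         if rem[i] + rem[j] != m:
--             return False
--         i += 1
--         j -= 1
--     if i == j and 2 * rem[i] != m:
--         return False
--     return True
-- ===== Notes on version B (the rewrite author's own statement) =====
-- stated objective: alternative
-- what changed: B drops A's hash-count-and-rescan entirely: it sorts the normalized remainders once, requires the zero prefix to have even length, then verifies pairing with two pointers (smallest+largest must sum to m, a lone middle element must equal m/2).
import Mathlib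
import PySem

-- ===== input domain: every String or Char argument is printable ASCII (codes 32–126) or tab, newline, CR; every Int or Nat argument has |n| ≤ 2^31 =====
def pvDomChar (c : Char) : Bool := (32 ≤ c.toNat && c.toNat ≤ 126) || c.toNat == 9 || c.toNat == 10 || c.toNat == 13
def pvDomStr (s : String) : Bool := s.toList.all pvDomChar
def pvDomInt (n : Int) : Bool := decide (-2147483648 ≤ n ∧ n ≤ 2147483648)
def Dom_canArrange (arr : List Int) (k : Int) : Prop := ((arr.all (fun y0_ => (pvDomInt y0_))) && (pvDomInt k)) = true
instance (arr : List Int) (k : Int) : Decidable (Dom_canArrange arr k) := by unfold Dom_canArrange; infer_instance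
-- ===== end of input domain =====

-- B replaces A's hash-table verification by a different algorithm: sort the
-- normalized remainders once, strip the zero prefix (must be even), then pair
-- smallest with largest by two pointers (objective: alternative).

-- ===== PORT A =====
-- A's second loop with its early 'return False', as structural recursion over arr
def canArrangeLoop (count : PySem.Dict Int Int) (k : Int) : List Int → Bool
  | [] => true
  | i :: rest =>
    let curr := PySem.Int.mod (PySem.Int.mod i k + k) k
    if curr = 0 then
      if PySem.Int.mod (count.getD curr 0) 2 = 1 then false
      else canArrangeLoop count k rest
    else if count.getD curr 0 ≠ count.getD (k - curr) 0 then false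
    else canArrangeLoop count k rest

def canArrange (arr : List Int) (k : Int) : Bool :=
  let count := arr.foldl (fun d i =>
    d.insert (PySem.Int.mod (PySem.Int.mod i k + k) k)
      (d.getD (PySem.Int.mod (PySem.Int.mod i k + k) k) 0 + 1)) PySem.Dict.empty
  canArrangeLoop count k arr

-- ===== PORT B =====
-- B's first while loop: index i after the leading zeros of the sorted list
def pvLeadZeros : List Int → Nat
  | [] => 0
  | x :: rest => if x = 0 then pvLeadZeros rest + 1 else 0

-- B's second while loop plus the final 'i == j' middle check: two pointers over
-- the segment rem[i..j] = this list, pairing first with last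
def pvTwoPtr (m : Int) : List Int → Bool
  | [] => true
  | [x] => decide (2 * x = m)
  | x :: y :: rest =>
      decide (x + (y :: rest).getLast (by simp) = m) &&
      pvTwoPtr m ((y :: rest).dropLast)
termination_by l => l.length
decreasing_by simp

def canArrange_alt (arr : List Int) (k : Int) : Bool :=
  let m := if k < 0 then -k else k   -- abs(k)
  let rem := PySem.List.sorted (arr.map (fun x => PySem.Int.mod x m)) (fun x => x) false
  let i := pvLeadZeros rem
  if i % 2 = 1 then false
  else pvTwoPtr m (rem.drop i)

-- ===== PRECONDITION & SPEC =====
-- Pre_ excludes exactly the inputs where Python A raises: k = 0 with a nonempty arr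
-- makes '%' raise ZeroDivisionError (k = 0 with arr = [] returns normally and is kept).
def Pre_canArrange (arr : List Int) (k : Int) : Prop := arr = [] ∨ k ≠ 0
instance (arr : List Int) (k : Int) : Decidable (Pre_canArrange arr k) := by unfold Pre_canArrange; infer_instance
def pvWitness_canArrange : List Int × Int := ([1, 2, 3, 4], 5)

def Spec_canArrange (arr : List Int) (k : Int) (out : Bool) : Prop := out = canArrange_alt arr k
instance (arr : List Int) (k : Int) (out : Bool) : Decidable (Spec_canArrange arr k out) := by unfold Spec_canArrange; infer_instance

-- ===== CLAIM (what is proved, stated in full; the proofs are below) =====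
def Claim_equal_canArrange : Prop := ∀ (arr : List Int) (k : Int), Dom_canArrange arr k → Pre_canArrange arr k → Spec_canArrange arr k (canArrange arr k)

-- ===== LEMMAS AND PROOFS =====

-- |k| as B computes it
def pvM (k : Int) : Int := if k < 0 then -k else k
-- the remainder key A computes
def pvKeyA (k i : Int) : Int := PySem.Int.mod (PySem.Int.mod i k + k) k
-- A's key expressed from B's key r = i % pvM k
def pvPhi (k r : Int) : Int := if 0 < k then r else if r = 0 then 0 else r - pvM k
-- the bucket size both sides reason about (as an Int, the value in A's dict)
def pvCnt (arr : List Int) (m v : Int) : Int := ((arr.map (fun i => i % m)).count v : Int)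
-- the same bucket size as a Nat (a List.count on the remainder list)
def pvCntN (arr : List Int) (m v : Int) : Nat := (arr.map (fun i => i % m)).count v

theorem pvM_pos {k : Int} (hk : k ≠ 0) : 0 < pvM k := by
  unfold pvM; split <;> omega

theorem keyA_eq_phi {k : Int} (hk : k ≠ 0) (i : Int) :
    pvKeyA k i = pvPhi k (i % pvM k) := by
  unfold pvKeyA PySem.Int.mod
  rw [Int.add_fmod, Int.fmod_self, add_zero, Int.fmod_fmod_of_dvd _ (dvd_refl k),
    Int.fmod_fmod_of_dvd _ (dvd_refl k), Int.fmod_eq_emod]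
  unfold pvPhi pvM
  rcases lt_or_gt_of_ne hk with hneg | hpos
  · have h1 : i % k = i % (-k) := by
      have := Int.emod_neg i (-k); simpa using this.symm
    have h3 : 0 ≤ i % (-k) := Int.emod_nonneg i (by omega)
    have h4 : i % (-k) < -k := Int.emod_lt_of_pos i (by omega)
    have h2 : (0 ≤ k ∨ k ∣ i) ↔ i % (-k) = 0 := by
      rw [← neg_dvd, Int.dvd_iff_emod_eq_zero]
      omega
    rw [h1]
    simp only [h2]
    split_ifs <;> omega
  · rw [if_pos (Or.inl (by omega : (0:Int) ≤ k))]
    split_ifs <;> omega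

theorem phi_zero_iff {k r : Int} (hk : k ≠ 0) (h0 : 0 ≤ r) (h1 : r < pvM k) :
    pvPhi k r = 0 ↔ r = 0 := by
  have := pvM_pos hk
  unfold pvPhi; split_ifs <;> omega

theorem phi_inj {k r₁ r₂ : Int} (hk : k ≠ 0) (h0 : 0 ≤ r₁) (h1 : r₁ < pvM k)
    (h2 : 0 ≤ r₂) (h3 : r₂ < pvM k) : pvPhi k r₁ = pvPhi k r₂ ↔ r₁ = r₂ := by
  have := pvM_pos hk
  unfold pvPhi; split_ifs <;> omega

theorem phi_compl {k r : Int} (hk : k ≠ 0) (h0 : 0 < r) (h1 : r < pvM k) :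
    k - pvPhi k r = pvPhi k (pvM k - r) := by
  have := pvM_pos hk
  unfold pvPhi pvM; unfold pvM at h1; split_ifs <;> omega

-- A's fold builds a counting dict: getD is the bucket count
theorem countA_getD (arr : List Int) (k v : Int) :
    (arr.foldl (fun d i =>
      d.insert (PySem.Int.mod (PySem.Int.mod i k + k) k)
        (d.getD (PySem.Int.mod (PySem.Int.mod i k + k) k) 0 + 1)) PySem.Dict.empty).getD v 0
    = ((arr.map (pvKeyA k)).count v : Int) := by
  have h := PySem.Dict.getD_foldl_insert_add_one (arr.map (pvKeyA k)) PySem.Dict.empty v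
  rw [List.foldl_map] at h
  unfold pvKeyA at h
  simpa [PySem.Dict.getD_empty] using h

-- A's key count equals the normalized bucket count through pvPhi
theorem countA_eq_cnt {k : Int} (hk : k ≠ 0) (arr : List Int) {r : Int}
    (h0 : 0 ≤ r) (h1 : r < pvM k) :
    ((arr.map (pvKeyA k)).count (pvPhi k r) : Int) = pvCnt arr (pvM k) r := by
  unfold pvCnt
  induction arr with
  | nil => simp
  | cons i rest ih =>
    have hm := pvM_pos hk
    have hr0 : 0 ≤ i % pvM k := Int.emod_nonneg i (by omega)
    have hr1 : i % pvM k < pvM k := Int.emod_lt_of_pos i hm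
    simp only [List.map_cons, List.count_cons]
    have : (pvKeyA k i == pvPhi k r) = (i % pvM k == r) := by
      rw [keyA_eq_phi hk i]
      by_cases h : i % pvM k = r
      · simp [h]
      · have h2 : pvPhi k (i % pvM k) ≠ pvPhi k r := fun hp => h ((phi_inj hk hr0 hr1 h0 h1).mp hp)
        simp [h, h2]
    rw [this]
    push_cast
    omega

-- A's per-element check, as a Bool
def pvCond (c : PySem.Dict Int Int) (k i : Int) : Bool :=
  if pvKeyA k i = 0 then ! decide (PySem.Int.mod (c.getD (pvKeyA k i) 0) 2 = 1)
  else decide (c.getD (pvKeyA k i) 0 = c.getD (k - pvKeyA k i) 0)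

theorem loop_cons (c : PySem.Dict Int Int) (k i : Int) (rest : List Int) :
    canArrangeLoop c k (i :: rest) = (pvCond c k i && canArrangeLoop c k rest) := by
  conv_lhs => rw [canArrangeLoop]
  unfold pvCond pvKeyA
  by_cases h0 : PySem.Int.mod (PySem.Int.mod i k + k) k = 0
  · by_cases h1 : PySem.Int.mod (c.getD (PySem.Int.mod (PySem.Int.mod i k + k) k) 0) 2 = 1 <;>
      simp [h0, h1]
  · by_cases h1 : c.getD (PySem.Int.mod (PySem.Int.mod i k + k) k) 0
        = c.getD (k - PySem.Int.mod (PySem.Int.mod i k + k) k) 0 <;>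
      simp [h0, h1]

-- A's scan loop is an 'all' over arr
theorem loop_all (c : PySem.Dict Int Int) (k : Int) (l : List Int) :
    canArrangeLoop c k l = l.all (pvCond c k) := by
  induction l with
  | nil => rfl
  | cons i rest ih => rw [loop_cons, ih, List.all_cons]

-- bridge: the value A's loop reads from its dict, in cnt terms
theorem getD_A {k : Int} (hk : k ≠ 0) (arr : List Int) {r : Int}
    (h0 : 0 ≤ r) (h1 : r < pvM k) :
    (arr.foldl (fun d i =>
      d.insert (PySem.Int.mod (PySem.Int.mod i k + k) k)
        (d.getD (PySem.Int.mod (PySem.Int.mod i k + k) k) 0 + 1)) PySem.Dict.empty).getD (pvPhi k r) 0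
    = pvCnt arr (pvM k) r := by
  rw [countA_getD]
  exact countA_eq_cnt hk arr h0 h1

theorem cnt_nonneg (arr : List Int) (m v : Int) : 0 ≤ pvCnt arr m v := by
  unfold pvCnt; positivity

-- the value A's loop reads, per element
theorem pvCond_char {k : Int} (hk : k ≠ 0) (arr : List Int) (i : Int) :
    pvCond (arr.foldl (fun d i =>
      d.insert (PySem.Int.mod (PySem.Int.mod i k + k) k)
        (d.getD (PySem.Int.mod (PySem.Int.mod i k + k) k) 0 + 1)) PySem.Dict.empty) k i = true ↔
    ((i % pvM k = 0 → pvCnt arr (pvM k) 0 % 2 = 0) ∧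
      (i % pvM k ≠ 0 → pvCnt arr (pvM k) (i % pvM k) = pvCnt arr (pvM k) (pvM k - i % pvM k))) := by
  have hm := pvM_pos hk
  have hr0 : 0 ≤ i % pvM k := Int.emod_nonneg i (by omega)
  have hr1 : i % pvM k < pvM k := Int.emod_lt_of_pos i hm
  have e0 : pvPhi k 0 = (0 : Int) := by unfold pvPhi; split_ifs <;> omega
  unfold pvCond
  rw [keyA_eq_phi hk i]
  by_cases h0 : i % pvM k = 0
  · have hphi0 : pvPhi k (i % pvM k) = 0 := by rw [h0]; exact e0
    rw [if_pos hphi0, hphi0]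
    have g0 := getD_A hk arr (le_rfl) hm
    rw [e0] at g0
    rw [g0, PySem.Int.mod_eq_emod_of_pos (by omega : (0:Int) < 2)]
    have hnn := cnt_nonneg arr (pvM k) 0
    simp only [Bool.not_eq_eq_eq_not, Bool.not_true, decide_eq_false_iff_not]
    constructor
    · intro h; exact ⟨fun _ => by omega, fun hne => absurd h0 hne⟩
    · intro h; have := h.1 h0; omega
  · have hphine : pvPhi k (i % pvM k) ≠ 0 := fun h => h0 ((phi_zero_iff hk hr0 hr1).mp h)
    rw [if_neg hphine]
    rw [getD_A hk arr hr0 hr1, phi_compl hk (by omega) hr1,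
      getD_A hk arr (by omega) (by omega)]
    simp only [decide_eq_true_eq]
    constructor
    · intro h; exact ⟨fun he => absurd he h0, fun _ => h⟩
    · intro h; exact h.2 h0

-- the canonical condition both programs decide
def pvS (arr : List Int) (m : Int) : Prop :=
  pvCntN arr m 0 % 2 = 0 ∧ ∀ r : Int, 0 < r → r < m → pvCntN arr m r = pvCntN arr m (m - r)

theorem cnt_cast (arr : List Int) (m v : Int) : pvCnt arr m v = (pvCntN arr m v : Int) := rfl

theorem cntN_pos_iff (arr : List Int) (m v : Int) :
    0 < pvCntN arr m v ↔ ∃ i ∈ arr, i % m = v := by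
  unfold pvCntN
  rw [List.count_pos_iff]
  simp [List.mem_map]

-- A = true ↔ the canonical condition (k ≠ 0)
theorem A_iff_S {arr : List Int} {k : Int} (hk : k ≠ 0) :
    canArrange arr k = true ↔ pvS arr (pvM k) := by
  have hm := pvM_pos hk
  unfold canArrange
  rw [loop_all, List.all_eq_true]
  simp only [fun i => pvCond_char hk arr i]
  constructor
  · intro h
    constructor
    · by_cases h0 : 0 < pvCntN arr (pvM k) 0
      · obtain ⟨i, hi, him⟩ := (cntN_pos_iff arr (pvM k) 0).mp h0
        have := (h i hi).1 him
        rw [cnt_cast] at this; omega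
      · omega
    · intro r hr0 hrm
      by_cases hpos : 0 < pvCntN arr (pvM k) r
      · obtain ⟨i, hi, him⟩ := (cntN_pos_iff arr (pvM k) r).mp hpos
        have := (h i hi).2 (by omega)
        rw [him, cnt_cast, cnt_cast] at this; omega
      · by_cases hpos2 : 0 < pvCntN arr (pvM k) (pvM k - r)
        · obtain ⟨i, hi, him⟩ := (cntN_pos_iff arr (pvM k) (pvM k - r)).mp hpos2
          have := (h i hi).2 (by omega)
          rw [him, cnt_cast, cnt_cast] at this
          have he : pvM k - (pvM k - r) = r := by omega
          rw [he] at this; omega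
        · omega
  · rintro ⟨h0, hsym⟩ i hi
    have hr0 : 0 ≤ i % pvM k := Int.emod_nonneg i (by omega)
    have hr1 : i % pvM k < pvM k := Int.emod_lt_of_pos i hm
    refine ⟨fun _ => ?_, fun hne => ?_⟩
    · rw [cnt_cast]; omega
    · have := hsym (i % pvM k) (by omega) hr1
      rw [cnt_cast, cnt_cast]; omega

-- ---- B side ----

-- the two-pointer loop succeeds iff negating-and-shifting the list reverses it
theorem twoPtr_iff (m : Int) (l : List Int) :
    pvTwoPtr m l = true ↔ l.map (fun x => m - x) = l.reverse := by
  induction l using pvTwoPtr.induct with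
  | case1 => simp [pvTwoPtr]
  | case2 x =>
    simp only [pvTwoPtr, decide_eq_true_eq, List.map_cons, List.map_nil, List.reverse_singleton,
      List.cons.injEq, and_true]
    omega
  | case3 x y rest ih =>
    rw [pvTwoPtr]
    set t := y :: rest with ht
    have hne : t ≠ [] := by simp [ht]
    have hsplit : t.dropLast ++ [t.getLast hne] = t := List.dropLast_append_getLast hne
    set d := t.dropLast with hd
    set b := t.getLast hne with hb
    have hl : x :: t = x :: (d ++ [b]) := by rw [hsplit]
    rw [hl]
    simp only [Bool.and_eq_true, decide_eq_true_eq, ih, List.map_cons, List.map_append,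
      List.map_cons, List.map_nil, List.reverse_cons, List.reverse_append, List.reverse_cons,
      List.reverse_nil, List.nil_append, List.cons_append, List.cons.injEq]
    constructor
    · rintro ⟨hxb, hmap⟩
      refine ⟨by omega, ?_⟩
      rw [hmap]
      have : m - b = x := by omega
      simp [this]
    · rintro ⟨hxb, happ⟩
      have hlen : (d.map (fun x => m - x)).length = d.reverse.length := by simp
      have := List.append_inj_left' happ (by simp)
      have h2 := List.append_inj_right' happ (by simp)
      simp at h2
      exact ⟨by omega, this⟩

-- for a ≤-sorted list, the reversal condition is symmetry of the counts
theorem symm_iff {m : Int} {l : List Int} (hs : l.Pairwise (· ≤ ·)) :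
    l.map (fun x => m - x) = l.reverse ↔ ∀ r : Int, l.count r = l.count (m - r) := by
  have hf : Function.Injective (fun x : Int => m - x) := fun a b h => by
    simp only at h; omega
  constructor
  · intro h r
    have hcg := congrArg (List.count r) h
    rw [List.count_reverse] at hcg
    have hc : (l.map (fun x => m - x)).count r = l.count (m - r) := by
      have := List.count_map_of_injective l (fun x : Int => m - x) hf (m - r)
      simpa [show m - (m - r) = r by omega] using this
    rw [hc] at hcg
    omega
  · intro h
    have hperm : (l.map (fun x => m - x)).Perm l.reverse := by
      rw [List.perm_iff_count]
      intro a
      have hc : (l.map (fun x => m - x)).count a = l.count (m - a) := by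
        have := List.count_map_of_injective l (fun x : Int => m - x) hf (m - a)
        simpa [show m - (m - a) = a by omega] using this
      rw [hc, List.count_reverse]
      have h2 := h (m - a)
      rw [show m - (m - a) = a by omega] at h2
      omega
    have hs1 : (l.map (fun x => m - x)).Pairwise (· ≥ ·) := by
      refine List.Pairwise.map _ ?_ hs
      intro a b hab
      simp only [ge_iff_le]
      omega
    have hs2 : l.reverse.Pairwise (· ≥ ·) := by
      rw [List.pairwise_reverse]
      exact hs.imp (fun h => h)
    exact hperm.eq_of_pairwise (fun a b _ _ hab hba => le_antisymm hba hab) hs1 hs2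

-- leading zeros of a sorted nonneg list: the count of 0
theorem leadZeros_count {l : List Int} (hs : l.Pairwise (· ≤ ·)) (hnn : ∀ x ∈ l, 0 ≤ x) :
    pvLeadZeros l = l.count 0 := by
  induction l with
  | nil => rfl
  | cons x rest ih =>
    rw [List.pairwise_cons] at hs
    rw [pvLeadZeros]
    by_cases hx : x = 0
    · rw [if_pos hx, ih hs.2 (fun y hy => hnn y (List.mem_cons_of_mem _ hy)), hx,
        List.count_cons_self]
    · rw [if_neg hx, List.count_cons_of_ne (by omega)]
      have hrest : rest.count 0 = 0 := by
        rw [List.count_eq_zero]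
        intro h0
        have := hs.1 0 h0
        have := hnn x (List.mem_cons_self ..)
        omega
      omega

-- dropping the leading zeros keeps every nonzero count and removes the zeros
theorem drop_leadZeros_count {l : List Int} (r : Int) (hr : r ≠ 0) :
    (l.drop (pvLeadZeros l)).count r = l.count r := by
  induction l with
  | nil => rfl
  | cons x rest ih =>
    rw [pvLeadZeros]
    by_cases hx : x = 0
    · rw [if_pos hx, List.drop_succ_cons, ih, hx, List.count_cons_of_ne (by omega)]
    · rw [if_neg hx, List.drop_zero]

theorem drop_leadZeros_pos {l : List Int} (hs : l.Pairwise (· ≤ ·)) (hnn : ∀ x ∈ l, 0 ≤ x) :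
    ∀ x ∈ l.drop (pvLeadZeros l), 0 < x := by
  induction l with
  | nil => intro x hx; simp at hx
  | cons a rest ih =>
    rw [List.pairwise_cons] at hs
    rw [pvLeadZeros]
    by_cases ha : a = 0
    · rw [if_pos ha, List.drop_succ_cons]
      exact ih hs.2 (fun y hy => hnn y (List.mem_cons_of_mem _ hy))
    · rw [if_neg ha, List.drop_zero]
      intro x hx
      have h0 : 0 ≤ a := hnn a (List.mem_cons_self ..)
      rcases List.mem_cons.mp hx with h | h
      · omega
      · have := hs.1 x h; omega

theorem count_eq_zero_of_forall_ne {l : List Int} {r : Int} (h : ∀ x ∈ l, x ≠ r) :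
    l.count r = 0 := by
  rw [List.count_eq_zero]; intro hm; exact h r hm rfl

-- B = true ↔ the canonical condition (k ≠ 0)
theorem B_iff_S {arr : List Int} {k : Int} (hk : k ≠ 0) :
    canArrange_alt arr k = true ↔ pvS arr (pvM k) := by
  have hm := pvM_pos hk
  unfold canArrange_alt
  rw [show (if k < 0 then -k else k) = pvM k from rfl]
  set m := pvM k with hmdef
  set rem := PySem.List.sorted (arr.map (fun x => PySem.Int.mod x m)) (fun x => x) false with hrem
  have hmap : arr.map (fun x => PySem.Int.mod x m) = arr.map (fun i => i % m) := by
    simp [PySem.Int.mod_eq_emod_of_pos hm]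
  have hrem2 : rem = PySem.List.sorted (arr.map (fun i => i % m)) (fun x => x) false := by
    rw [hrem, hmap]
  have hperm : rem.Perm (arr.map (fun i => i % m)) := by
    rw [hrem2]
    exact PySem.List.sorted_perm (arr.map (fun i => i % m)) (fun x => x) false
  have hcount : ∀ v : Int, rem.count v = pvCntN arr m v := fun v => hperm.count_eq v
  have hsorted : rem.Pairwise (· ≤ ·) := by
    have := PySem.List.sorted_pairwise (arr.map (fun x => PySem.Int.mod x m)) (fun x => x) 
    exact this
  have hmem : ∀ x ∈ rem, 0 ≤ x ∧ x < m := by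
    intro x hx
    have : x ∈ arr.map (fun i => i % m) := hperm.mem_iff.mp hx
    obtain ⟨i, _, rfl⟩ := List.mem_map.mp this
    exact ⟨Int.emod_nonneg i (by omega), Int.emod_lt_of_pos i hm⟩
  have hnn : ∀ x ∈ rem, 0 ≤ x := fun x hx => (hmem x hx).1
  set pos := rem.drop (pvLeadZeros rem) with hpos
  have hposmem : ∀ x ∈ pos, 0 < x ∧ x < m := by
    intro x hx
    exact ⟨drop_leadZeros_pos hsorted hnn x hx,
      (hmem x (List.mem_of_mem_drop hx)).2⟩
  have hpossorted : pos.Pairwise (· ≤ ·) := hsorted.drop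
  have hlz : pvLeadZeros rem = pvCntN arr m 0 := by
    rw [leadZeros_count hsorted hnn, hcount]
  have hposcount : ∀ v : Int, v ≠ 0 → pos.count v = pvCntN arr m v := by
    intro v hv
    rw [hpos, drop_leadZeros_count v hv, hcount]
  have hcntN_zero_of_out : ∀ v : Int, (v ≤ 0 ∨ m ≤ v) → pvCntN arr m v = 0 ∨ (v = 0) := by
    intro v hv
    by_cases h0 : v = 0
    · exact Or.inr h0
    · left
      rw [← hcount, List.count_eq_zero]
      intro hmem2
      have := hmem v hmem2
      omega
  by_cases hodd : pvLeadZeros rem % 2 = 1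
  · rw [if_pos hodd]
    simp only [Bool.false_eq_true, false_iff]
    unfold pvS
    rw [← hlz]
    rintro ⟨hc, -⟩
    omega
  · rw [if_neg hodd]
    rw [twoPtr_iff, symm_iff hpossorted]
    unfold pvS
    rw [← hlz]
    constructor
    · intro h
      refine ⟨by omega, ?_⟩
      intro r hr0 hrm
      have h1 := h r
      rw [hposcount r (by omega), hposcount (m - r) (by omega)] at h1
      exact h1
    · rintro ⟨_, hsym⟩ r
      by_cases hr1 : 0 < r ∧ r < m
      · rw [hposcount r (by omega), hposcount (m - r) (by omega)]
        exact hsym r hr1.1 hr1.2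
      · -- outside (0, m): both sides are 0
        have hz : pos.count r = 0 := by
          apply count_eq_zero_of_forall_ne
          intro x hx
          have := hposmem x hx
          omega
        have hz2 : pos.count (m - r) = 0 := by
          apply count_eq_zero_of_forall_ne
          intro x hx
          have := hposmem x hx
          omega
        rw [hz, hz2]

-- ===== VERDICT (by name: the statement is the Claim_ definition above) =====
theorem canArrange_spec : Claim_equal_canArrange := by
  intro arr k _ hpre
  unfold Spec_canArrange
  rcases hpre with hnil | hk
  · subst hnil
    simp [canArrange, canArrange_alt, canArrangeLoop, pvLeadZeros, pvTwoPtr,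
      PySem.List.sorted, PySem.Dict.empty]
  · have hA := A_iff_S (arr := arr) hk
    have hB := B_iff_S (arr := arr) hk
    by_cases hS : pvS arr (pvM k)
    · rw [hA.mpr hS, hB.mpr hS]
    · have h1 : canArrange arr k ≠ true := fun h => hS (hA.mp h)
      have h2 : canArrange_alt arr k ≠ true := fun h => hS (hB.mp h)
      simp only [Bool.not_eq_true] at h1 h2
      rw [h1, h2]
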